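-- pv_equiv track=rewrite | github.com/jonha892/AdventOfCode | 2019/d24_2.py | gen_inner
-- ===== SOURCE A (Python) =====
-- def gen_inner(grid):
--     n_grid = [list('.'*5) for y in range(5)]
--
--     n = False
--     s = False
--     e = False
--     w = False
--     if grid[1][2] == '#':
--         n = True
--     if grid[3][2] == '#':
--         s = True
--     if grid[2][1] == '#':
--         w = True
--     if grid[2][3] == '#':
--         e = True
--     for x in range(5):
--         if n:
--             n_grid[0][x] = '#'
--         if s:
--             n_grid[-1][x] = '#'
--     for y in range(5):
--         if n:
--             n_grid[y][0] = '#'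
--         if s:
--             n_grid[y][-1] = '#'
--     return n_grid
-- ===== SOURCE B (Python) =====
-- # The result depends only on whether grid[1][2] and grid[3][2] are '#':
-- # there are only four possible outputs, so B just looks the answer up in a
-- # table of the four literal grids (grid[2][1]/grid[2][3] never matter).
--
-- _EMPTY = ['.....'] * 5
-- _TOP_LEFT = ['#####',
--              '#....',
--              '#....',
--              '#....',
--              '#....']
-- _BOT_RIGHT = ['....#',
--               '....#',
--               '....#',
--               '....#',
--               '#####']
-- _BOTH = ['#####',
--          '#...#',
--          '#...#',
--          '#...#',
--          '#####']
--
-- _TABLE = {(False, False): _EMPTY,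
--           (True, False): _TOP_LEFT,
--           (False, True): _BOT_RIGHT,
--           (True, True): _BOTH}
--
-- def gen_inner(grid):
--     rows = _TABLE[(grid[1][2] == '#', grid[3][2] == '#')]
--     return [list(r) for r in rows]
-- ===== Notes on version B (the rewrite author's own statement) =====
-- stated objective: alternative
-- what changed: B recognises that the output depends only on the two booleans grid[1][2]=='#' and grid[3][2]=='#' and returns a copy of one of four precomputed literal grids from a lookup table, replacing A's init-all-dots grid plus two edge-overwrite mutation passes; grid[2][1]/grid[2][3] are never read since they never affect A's output.
import Mathlib
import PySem

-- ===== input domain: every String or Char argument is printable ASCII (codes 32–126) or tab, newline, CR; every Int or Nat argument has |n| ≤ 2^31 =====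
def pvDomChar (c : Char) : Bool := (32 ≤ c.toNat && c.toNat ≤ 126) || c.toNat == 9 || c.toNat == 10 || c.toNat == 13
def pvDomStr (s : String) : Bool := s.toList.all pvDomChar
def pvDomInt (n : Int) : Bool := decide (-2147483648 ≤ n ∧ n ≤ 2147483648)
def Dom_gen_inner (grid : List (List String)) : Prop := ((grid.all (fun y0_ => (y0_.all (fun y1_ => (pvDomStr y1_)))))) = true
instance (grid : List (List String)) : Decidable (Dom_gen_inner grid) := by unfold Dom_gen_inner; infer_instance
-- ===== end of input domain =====

-- B: the output depends only on two booleans, so B returns a copy of one of four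
-- precomputed literal grids from a lookup table; same return value on Pre_.

-- ===== PORT A =====
-- Python list assignment row[i] = v with a possibly negative index (in range here)
def pySetRow (xs : List String) (i : Int) (v : String) : List String :=
  let j := if i < 0 then i + xs.length else i
  xs.set j.toNat v

-- n_grid[y][x] = v
def pySet2 (g : List (List String)) (y x : Int) (v : String) : List (List String) :=
  let yi := if y < 0 then y + g.length else y
  g.modify yi.toNat (fun row => pySetRow row x v)

-- grid[i][j], defaulting to "" (Pre_ guarantees the access succeeds)
def pyCell (grid : List (List String)) (i j : Int) : String :=
  ((PySem.List.pyGet? grid i).bind (fun r => PySem.List.pyGet? r j)).getD ""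

def gen_inner (grid : List (List String)) : List (List String) :=
  let n_grid : List (List String) := (List.range 5).map (fun _ => [".", ".", ".", ".", "."])
  let n := false
  let s := false
  let e := false
  let w := false
  let n := if pyCell grid 1 2 = "#" then true else n
  let s := if pyCell grid 3 2 = "#" then true else s
  let w := if pyCell grid 2 1 = "#" then true else w
  let e := if pyCell grid 2 3 = "#" then true else e
  let _ := e
  let _ := w
  let n_grid := (PySem.List.pyRange 0 5 1).foldl (fun g x =>
      let g := if n then pySet2 g 0 x "#" else g
      if s then pySet2 g (-1) x "#" else g) n_grid
  let n_grid := (PySem.List.pyRange 0 5 1).foldl (fun g y =>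
      let g := if n then pySet2 g y 0 "#" else g
      if s then pySet2 g y (-1) "#" else g) n_grid
  n_grid

-- ===== PORT B =====
-- the four literal grids (rows as strings, as in Source B)
def bEmpty : List String := [".....", ".....", ".....", ".....", "....."]
def bTopLeft : List String := ["#####", "#....", "#....", "#....", "#...."]
def bBotRight : List String := ["....#", "....#", "....#", "....#", "#####"]
def bBoth : List String := ["#####", "#...#", "#...#", "#...#", "#####"]

def bTable : PySem.Dict (Bool × Bool) (List String) :=
  PySem.Dict.ofList
    [((false, false), bEmpty), ((true, false), bTopLeft),
     ((false, true), bBotRight), ((true, true), bBoth)]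

def gen_inner_alt (grid : List (List String)) : List (List String) :=
  let rows := (PySem.Dict.get? bTable (pyCell grid 1 2 = "#", pyCell grid 3 2 = "#")).getD []
  rows.map (fun r => r.toList.map (fun c => String.ofList [c]))

-- ===== PRECONDITION & SPEC =====
-- Exactly the inputs on which Python A returns: the four reads grid[1][2], grid[3][2],
-- grid[2][1], grid[2][3] are in range (otherwise A raises IndexError).
def Pre_gen_inner (grid : List (List String)) : Prop :=
  4 ≤ grid.length ∧ 3 ≤ (grid.getD 1 []).length ∧ 4 ≤ (grid.getD 2 []).length ∧ 3 ≤ (grid.getD 3 []).length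
instance (grid : List (List String)) : Decidable (Pre_gen_inner grid) := by unfold Pre_gen_inner; infer_instance

def pvWitness_gen_inner : List (List String) :=
  [[".", ".", ".", ".", "."], [".", ".", "#", ".", "."], [".", "#", ".", "#", "."],
   [".", ".", "#", ".", "."], [".", ".", ".", ".", "."]]

def Spec_gen_inner (grid : List (List String)) (out : List (List String)) : Prop := out = gen_inner_alt grid
instance (grid : List (List String)) (out : List (List String)) : Decidable (Spec_gen_inner grid out) := by unfold Spec_gen_inner; infer_instance

-- ===== CLAIM =====
def Claim_equal_gen_inner : Prop := ∀ (grid : List (List String)), Dom_gen_inner grid → Pre_gen_inner grid → Spec_gen_inner grid (gen_inner grid)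

-- ===== LEMMAS AND PROOFS =====

-- ===== VERDICT =====
theorem gen_inner_spec : Claim_equal_gen_inner := by
  intro grid _ _
  unfold Spec_gen_inner gen_inner gen_inner_alt
  by_cases h1 : pyCell grid 1 2 = "#" <;>
    by_cases h2 : pyCell grid 3 2 = "#" <;>
      simp only [h1, h2, decide_true, decide_false, if_pos, if_neg, not_false_iff] <;> rfl
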